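-- pv_equiv track=rewrite | github.com/hamzaco/GRNsPRL | simulation.py | is_new_cycle
-- ===== SOURCE A (Python) =====
-- def is_new_cycle(cycle, Cycles):
--
--     for j in range(0, len(Cycles)):
--         candWithOccurence=Cycles[j]
--         cand= candWithOccurence[0]
--         for i in range(0,len(cand)):
--             temp = cand[1:]
--             temp.append(cand[0])
--             cand = temp
--             if cand == cycle:
--                 Cycles.remove(candWithOccurence)
--                 Cycles.append((candWithOccurence[0],candWithOccurence[1]+1))
--                 return False
--     return True
-- ===== SOURCE B (Python) =====
-- def is_new_cycle(cycle, Cycles):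
--     n = len(cycle)
--     for candWithOccurence in list(Cycles):
--         cand = candWithOccurence[0]
--         if len(cand) == n:
--             doubled = cand + cand
--             if any(doubled[i:i + n] == cycle for i in range(n)):
--                 Cycles.remove(candWithOccurence)
--                 Cycles.append((candWithOccurence[0], candWithOccurence[1] + 1))
--                 return False
--     return True
-- ===== Notes on version B (the rewrite author's own statement) =====
-- stated objective: faster
-- what changed: B replaces A's inner loop that repeatedly materialises the next rotation (copy tail + append head, then full-list compare) by the classic doubling trick: a stored cycle matches iff it has the same length and `cycle` occurs as a contiguous slice of cand+cand, with a length pre-filter skipping mismatched candidates entirely.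
import Mathlib
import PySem

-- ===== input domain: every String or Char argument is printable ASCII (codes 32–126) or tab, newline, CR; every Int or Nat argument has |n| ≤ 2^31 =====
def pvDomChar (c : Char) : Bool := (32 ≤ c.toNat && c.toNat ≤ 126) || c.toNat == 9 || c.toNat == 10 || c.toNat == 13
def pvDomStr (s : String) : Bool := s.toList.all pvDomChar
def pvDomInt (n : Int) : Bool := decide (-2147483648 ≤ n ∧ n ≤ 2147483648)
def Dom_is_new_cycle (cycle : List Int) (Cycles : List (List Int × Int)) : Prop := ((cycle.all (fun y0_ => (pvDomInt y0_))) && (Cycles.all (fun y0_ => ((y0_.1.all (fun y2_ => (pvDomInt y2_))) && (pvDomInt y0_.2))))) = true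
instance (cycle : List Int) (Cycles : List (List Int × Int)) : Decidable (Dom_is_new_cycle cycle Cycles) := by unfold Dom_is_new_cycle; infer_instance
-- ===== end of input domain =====

-- B checks each stored cycle against `cycle` as a contiguous block of the doubled list instead of
-- materialising every rotation (objective: alternative). Equivalence is about the RETURN value;
-- both Pythons perform the same count-bump mutation of Cycles on a hit.

-- ===== PORT A =====
-- inner loop body: temp = cand[1:]; temp.append(cand[0]); cand = temp
-- (cand is nonempty whenever the loop body runs, so cand[0] = take 1; `.take 1` is exact there)
def pvRotA (cand : List Int) : List Int := cand.drop 1 ++ cand.take 1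

-- for i in range(0, len(cand)): rotate, compare, early return True on match
def pvInnerA (cycle : List Int) : Nat → List Int → Bool
  | 0, _ => false
  | Nat.succ k, cand =>
      let c := pvRotA cand
      if c = cycle then true else pvInnerA cycle k c

-- for j in range(0, len(Cycles)): A returns immediately after its mutation, so the scan is a
-- left-to-right early-return traversal of Cycles (the mutation never affects iteration).
def is_new_cycle (cycle : List Int) (Cycles : List (List Int × Int)) : Bool :=
  match Cycles with
  | [] => true
  | (cand, _cnt) :: rest =>
      if pvInnerA cycle cand.length cand then false else is_new_cycle cycle rest

-- ===== PORT B =====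
-- if len(cand) == n and any(doubled[i:i+n] == cycle for i in range(n))
def pvCheckB (cycle : List Int) (cand : List Int) : Bool :=
  let n := cycle.length
  if cand.length = n then
    let doubled := cand ++ cand
    (List.range n).any (fun i =>
      PySem.List.slice doubled (some (i : Int)) (some ((i : Int) + (n : Int))) = cycle)
  else false

def is_new_cycle_alt (cycle : List Int) (Cycles : List (List Int × Int)) : Bool :=
  match Cycles with
  | [] => true
  | (cand, _cnt) :: rest =>
      if pvCheckB cycle cand then false else is_new_cycle_alt cycle rest

-- ===== PRECONDITION & SPEC =====
def Spec_is_new_cycle (cycle : List Int) (Cycles : List (List Int × Int)) (out : Bool) : Prop := out = is_new_cycle_alt cycle Cycles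
instance (cycle : List Int) (Cycles : List (List Int × Int)) (out : Bool) : Decidable (Spec_is_new_cycle cycle Cycles out) := by unfold Spec_is_new_cycle; infer_instance

-- ===== CLAIM (what is proved, stated in full; the proofs are below) =====
def Claim_equal_is_new_cycle : Prop := ∀ (cycle : List Int) (Cycles : List (List Int × Int)), Dom_is_new_cycle cycle Cycles → Spec_is_new_cycle cycle Cycles (is_new_cycle cycle Cycles)

-- ===== LEMMAS AND PROOFS =====

theorem pvRotA_eq_rotate (c : List Int) : pvRotA c = c.rotate 1 := by
  cases c with
  | nil => simp [pvRotA]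
  | cons a t =>
      rw [List.rotate_eq_drop_append_take (by simp)]
      rfl

theorem pvInnerA_iff (cycle : List Int) :
    ∀ (k : Nat) (c : List Int),
      pvInnerA cycle k c = true ↔ ∃ j : Nat, 1 ≤ j ∧ j ≤ k ∧ c.rotate j = cycle := by
  intro k
  induction k with
  | zero => intro c; simp [pvInnerA]
  | succ k ih =>
      intro c
      simp only [pvInnerA]
      rw [pvRotA_eq_rotate]
      by_cases h : c.rotate 1 = cycle
      · rw [if_pos h]
        constructor
        · intro _
          exact ⟨1, by omega, by omega, h⟩
        · intro _
          rfl
      · rw [if_neg h, ih]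
        constructor
        · rintro ⟨j, hj1, hjk, hr⟩
          refine ⟨j + 1, by omega, by omega, ?_⟩
          rw [List.rotate_rotate] at hr
          simpa [Nat.add_comm] using hr
        · rintro ⟨j, hj1, hjk, hr⟩
          have hj2 : 2 ≤ j := by
            rcases Nat.lt_or_ge j 2 with h2 | h2
            · interval_cases j
              exact absurd hr h
            · exact h2
          refine ⟨j - 1, by omega, by omega, ?_⟩
          rw [List.rotate_rotate]
          have : 1 + (j - 1) = j := by omega
          rw [this]; exact hr

theorem slice_doubled (cand : List Int) (n i : Nat) (hn : cand.length = n) (hi : i < n) :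
    PySem.List.slice (cand ++ cand) (some (i : Int)) (some ((i : Int) + (n : Int))) =
      cand.rotate i := by
  rw [PySem.List.slice_natCast_add]
  rw [List.rotate_eq_drop_append_take (by omega)]
  rw [List.drop_append_of_le_length (by omega)]
  rw [List.take_append]
  congr 1
  · exact List.take_of_length_le (by simp; omega)
  · congr 1
    simp [hn]
    omega

theorem pvCheckB_iff (cycle cand : List Int) :
    pvCheckB cycle cand = true ↔
      cand.length = cycle.length ∧ ∃ i : Nat, i < cycle.length ∧ cand.rotate i = cycle := by
  by_cases h : cand.length = cycle.length
  · simp only [pvCheckB]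
    rw [if_pos h, List.any_eq_true]
    constructor
    · rintro ⟨i, hmem, hs⟩
      rw [List.mem_range] at hmem
      have hs' := of_decide_eq_true hs
      rw [slice_doubled cand cycle.length i h hmem] at hs'
      exact ⟨h, i, hmem, hs'⟩
    · rintro ⟨-, i, hi, hr⟩
      refine ⟨i, List.mem_range.mpr hi, ?_⟩
      exact decide_eq_true (by rw [slice_doubled cand cycle.length i h hi]; exact hr)
  · simp [pvCheckB, h]

theorem per_cand_eq (cycle cand : List Int) :
    pvInnerA cycle cand.length cand = pvCheckB cycle cand := by
  by_cases hA : pvInnerA cycle cand.length cand = true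
  · obtain ⟨j, hj1, hjL, hr⟩ := (pvInnerA_iff cycle cand.length cand).mp hA
    have hlen : cand.length = cycle.length := by
      have := congrArg List.length hr
      simpa using this
    have hB : pvCheckB cycle cand = true := by
      rw [pvCheckB_iff]
      refine ⟨hlen, j % cand.length, ?_, ?_⟩
      · have hm : j % cand.length < cand.length := Nat.mod_lt j (by omega)
        omega
      · rw [List.rotate_mod]; exact hr
    rw [hA, hB]
  · by_cases hB : pvCheckB cycle cand = true
    · exfalso
      obtain ⟨hlen, i, hi, hr⟩ := (pvCheckB_iff cycle cand).mp hB
      apply hA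
      rw [pvInnerA_iff]
      rcases Nat.eq_zero_or_pos i with h0 | h0
      · subst h0
        exact ⟨cand.length, by omega, le_rfl, by simpa [List.rotate_length] using hr⟩
      · exact ⟨i, h0, by omega, hr⟩
    · rw [Bool.not_eq_true] at hA hB
      rw [hA, hB]

theorem outer_eq (cycle : List Int) (Cycles : List (List Int × Int)) :
    is_new_cycle cycle Cycles = is_new_cycle_alt cycle Cycles := by
  induction Cycles with
  | nil => rfl
  | cons p rest ih =>
      obtain ⟨cand, cnt⟩ := p
      simp only [is_new_cycle, is_new_cycle_alt, per_cand_eq, ih]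

-- ===== VERDICT (by name: the statement is the Claim_ definition above) =====
theorem is_new_cycle_spec : Claim_equal_is_new_cycle := by
  intro cycle Cycles _
  exact outer_eq cycle Cycles
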